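-- pv_equiv track=rewrite | github.com/DishaK-hub/Algorithms-projects | CS-514/Myownprograms/prac1.py | _nbestc
-- ===== SOURCE A (Python) =====
-- import heapq
--
-- def _nbestc(a, b):
--     def put(i, j):
--         if 0 <= i < n and 0 <= j < n and (i, j) not in used:
--             used.add((i, j))
--             heapq.heappush(h, ((sa[i]+sb[j], sb[j]), (sa[i], sb[j]), (i, j))) # decorate: cmp_key, pair, index
--
--     sa, sb = sorted(a), sorted(b)
--     n = len(a)
--     h, used = [], set()
--
--     put(0, 0)
--     for _ in range(n):
--         _, xy, (i, j) = heapq.heappop(h)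
--         yield xy
--         put(i+1, j)
--         put(i, j+1)
-- ===== SOURCE B (Python) =====
-- def _nbestc(a, b):
--     # Sort-everything alternative: decorate all n*n pairs with the same
--     # (sum, b-value, a-value, i, j) ordering key, sort once, yield the first n.
--     sa, sb = sorted(a), sorted(b)
--     n = len(a)
--     order = sorted((sa[i] + sb[j], sb[j], sa[i], i, j) for i in range(n) for j in range(n))
--     for _, y, x, _, _ in order[:n]:
--         yield (x, y)
-- ===== Notes on version B (the rewrite author's own statement) =====
-- stated objective: simpler
-- what changed: Replaces the best-first heap search with visited-set bookkeeping by building the full decorated n*n pair list, sorting it once, and yielding the first n pairs.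
-- outside the precondition, e.g. on _nbestc([0, 0, 0], [0, 1]): A returns [(0, 0), (0, 0), (0, 0)], B raises IndexError
import Mathlib
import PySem

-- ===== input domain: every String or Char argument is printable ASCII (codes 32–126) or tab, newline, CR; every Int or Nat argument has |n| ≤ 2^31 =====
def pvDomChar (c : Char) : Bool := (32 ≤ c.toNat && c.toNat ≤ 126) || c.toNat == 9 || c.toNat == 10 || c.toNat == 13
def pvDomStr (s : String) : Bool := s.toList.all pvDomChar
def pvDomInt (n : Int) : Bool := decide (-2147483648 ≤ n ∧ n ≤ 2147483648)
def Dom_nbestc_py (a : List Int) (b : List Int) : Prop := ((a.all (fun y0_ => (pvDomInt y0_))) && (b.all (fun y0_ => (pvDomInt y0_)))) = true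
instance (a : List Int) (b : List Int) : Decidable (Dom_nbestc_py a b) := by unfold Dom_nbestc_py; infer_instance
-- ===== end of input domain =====

-- B replaces A's best-first heap search (visited set + dual expansion) by sorting the
-- full decorated n*n pair grid once and taking the first n pairs: simpler, same output.


-- ===== PORT A =====
-- Port of A's heap best-first search.  Exactness notes:
-- * heapq is observed only through push and pop-min, and all stored entries are
--   distinct (each ends in its distinct index pair), so modelling the heap as a
--   list with minimum extraction (pvHeapPopA) is exact;
-- * Python compares the nested tuples lexicographically; pvFlatA lists the 6 integer
--   components of an entry and '<' on List Int is that same lexicographic order;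
-- * sa[i] / sb[j] are read with getD _ 0: exact because put's bounds guard keeps
--   0 ≤ i,j < n = len(sa) and Pre_ (len(a) ≤ len(b)) keeps j < len(sb);
-- * an empty heap (Python heappop raises IndexError) is unreachable under Pre_;
--   the port returns the accumulated output there.

def pvEntA (sa sb : List Int) (i j : Int) : (Int × Int) × (Int × Int) × (Int × Int) :=
  let x := sa.getD i.toNat 0
  let y := sb.getD j.toNat 0
  ((x + y, y), (x, y), (i, j))

def pvFlatA (e : (Int × Int) × (Int × Int) × (Int × Int)) : List Int :=
  [e.1.1, e.1.2, e.2.1.1, e.2.1.2, e.2.2.1, e.2.2.2]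

def pvHeapPopA : List ((Int × Int) × (Int × Int) × (Int × Int)) →
    Option (((Int × Int) × (Int × Int) × (Int × Int)) × List ((Int × Int) × (Int × Int) × (Int × Int)))
  | [] => none
  | e :: h =>
    match pvHeapPopA h with
    | none => some (e, [])
    | some (m, r) => if pvFlatA e < pvFlatA m then some (e, h) else some (m, e :: r)

def pvPutA (sa sb : List Int) (n : Int)
    (st : List ((Int × Int) × (Int × Int) × (Int × Int)) × PySem.Set (Int × Int)) (i j : Int) :
    List ((Int × Int) × (Int × Int) × (Int × Int)) × PySem.Set (Int × Int) :=
  if 0 ≤ i ∧ i < n ∧ 0 ≤ j ∧ j < n ∧ (i, j) ∉ st.2 then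
    (pvEntA sa sb i j :: st.1, PySem.Set.add st.2 (i, j))
  else st

def pvLoopA (sa sb : List Int) (n : Int) :
    Nat → List ((Int × Int) × (Int × Int) × (Int × Int)) → PySem.Set (Int × Int) →
    List (Int × Int) → List (Int × Int)
  | 0, _, _, out => out
  | t + 1, h, used, out =>
    match pvHeapPopA h with
    | none => out
    | some (e, h') =>
      let st1 := pvPutA sa sb n (h', used) (e.2.2.1 + 1) e.2.2.2
      let st2 := pvPutA sa sb n st1 e.2.2.1 (e.2.2.2 + 1)
      pvLoopA sa sb n t st2.1 st2.2 (out ++ [e.2.1])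

def nbestc_py (a : List Int) (b : List Int) : List (Int × Int) :=
  let sa := PySem.List.sorted a (fun x => x) false
  let sb := PySem.List.sorted b (fun x => x) false
  let n : Int := a.length
  let st0 := pvPutA sa sb n ([], PySem.Set.empty) 0 0
  pvLoopA sa sb n a.length st0.1 st0.2 []

-- ===== PORT B =====
-- Port of B.  The generator's 5-tuples are sorted by Python's tuple order; the sort
-- key pvKeyB lists the 5 integer components and '<' on List Int is that same
-- lexicographic order (all key lists have length 5, so list-lex = tuple-lex).
def pvKeyB (e : Int × Int × Int × Int × Int) : List Int :=
  [e.1, e.2.1, e.2.2.1, e.2.2.2.1, e.2.2.2.2]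

def nbestc_py_alt (a : List Int) (b : List Int) : List (Int × Int) :=
  let sa := PySem.List.sorted a (fun x => x) false
  let sb := PySem.List.sorted b (fun x => x) false
  let n := a.length
  let cells := (List.range n).flatMap (fun i => (List.range n).map (fun j =>
    (sa.getD i 0 + sb.getD j 0, sb.getD j 0, sa.getD i 0, (i : Int), (j : Int))))
  let order := PySem.List.sorted cells pvKeyB false
  (order.take n).map (fun e => (e.2.2.1, e.2.1))

-- ===== PRECONDITION & SPEC =====
-- Pre_ excludes len(b) < len(a): there the n-step run reads past the end of sorted(b),
-- so A raises IndexError on most such inputs and on the remainder returns an accidental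
-- truncated-grid value, while B uniformly raises IndexError.
def Pre_nbestc_py (a : List Int) (b : List Int) : Prop := a.length ≤ b.length
instance (a : List Int) (b : List Int) : Decidable (Pre_nbestc_py a b) := by
  unfold Pre_nbestc_py; infer_instance

def pvWitness_nbestc_py : List Int × List Int := ([3, 1, 2], [2, 0, 5])

def Spec_nbestc_py (a : List Int) (b : List Int) (out : List (Int × Int)) : Prop := out = nbestc_py_alt a b
instance (a : List Int) (b : List Int) (out : List (Int × Int)) : Decidable (Spec_nbestc_py a b out) := by unfold Spec_nbestc_py; infer_instance

-- ===== CLAIM (what is proved, stated in full; the proofs are below) =====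
def Claim_equal_nbestc_py : Prop := ∀ (a : List Int) (b : List Int), Dom_nbestc_py a b → Pre_nbestc_py a b → Spec_nbestc_py a b (nbestc_py a b)

-- ===== LEMMAS AND PROOFS =====

-- Abstract cells (Nat indices) and the global key order both programs follow.
def pvGrid (n : Nat) : List (Nat × Nat) :=
  (List.range n).flatMap (fun i => (List.range n).map (fun j => (i, j)))

def pvKeyN (sa sb : List Int) (c : Nat × Nat) : List Int :=
  [sa.getD c.1 0 + sb.getD c.2 0, sb.getD c.2 0, sa.getD c.1 0, (c.1 : Int), (c.2 : Int)]

def pvEntN (sa sb : List Int) (c : Nat × Nat) : (Int × Int) × (Int × Int) × (Int × Int) :=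
  pvEntA sa sb c.1 c.2

def pvSortL (sa sb : List Int) (n : Nat) : List (Nat × Nat) :=
  PySem.List.sorted (pvGrid n) (pvKeyN sa sb) false

def pvPair (sa sb : List Int) (c : Nat × Nat) : Int × Int := (sa.getD c.1 0, sb.getD c.2 0)

-- "cell c has a popped predecessor (or is the origin)" — what makes `put` reach c.
def pvTrig (P : List (Nat × Nat)) (c : Nat × Nat) : Prop :=
  c = (0, 0) ∨ ((c.1 - 1, c.2) ∈ P ∧ 0 < c.1) ∨ ((c.1, c.2 - 1) ∈ P ∧ 0 < c.2)

-- Loop invariant after t pops.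
def PvInv (sa sb : List Int) (n t : Nat)
    (h : List ((Int × Int) × (Int × Int) × (Int × Int))) (used : PySem.Set (Int × Int)) : Prop :=
  ∃ H : List (Nat × Nat),
    h = H.map (pvEntN sa sb) ∧ H.Nodup ∧
    (∀ c ∈ H, c ∈ pvGrid n) ∧
    (∀ c ∈ H, c ∉ (pvSortL sa sb n).take t) ∧
    (∀ c : Nat × Nat, c ∈ pvGrid n →
      (((c.1 : Int), (c.2 : Int)) ∈ used ↔ c ∈ (pvSortL sa sb n).take t ∨ c ∈ H)) ∧
    (∀ c ∈ pvGrid n, pvTrig ((pvSortL sa sb n).take t) c → ((c.1 : Int), (c.2 : Int)) ∈ used)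

lemma pv_mem_grid {n : Nat} {c : Nat × Nat} : c ∈ pvGrid n ↔ c.1 < n ∧ c.2 < n := by
  cases c with
  | mk i j =>
    show (i, j) ∈ (List.range n) ×ˢ (List.range n) ↔ _
    simp [List.mem_product]

lemma pv_nodup_grid (n : Nat) : (pvGrid n).Nodup := by
  show ((List.range n) ×ˢ (List.range n)).Nodup
  exact List.Nodup.product (List.nodup_range) (List.nodup_range)

lemma pv_keyN_inj {sa sb : List Int} {c c' : Nat × Nat}
    (h : pvKeyN sa sb c = pvKeyN sa sb c') : c = c' := by
  have h4 := congrArg (fun l => l.getD 3 0) h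
  have h5 := congrArg (fun l => l.getD 4 0) h
  simp only [pvKeyN, List.getD_cons_succ, List.getD_cons_zero] at h4 h5
  exact Prod.ext (by exact_mod_cast h4) (by exact_mod_cast h5)

lemma pv_entN_inj {sa sb : List Int} : Function.Injective (pvEntN sa sb) := by
  intro c c' h
  simp only [pvEntN, pvEntA, Prod.ext_iff] at h
  obtain ⟨-, -, h4, h5⟩ := h
  exact Prod.ext (by exact_mod_cast h4) (by exact_mod_cast h5)

lemma pv_flat_lt_iff {sa sb : List Int} {c c' : Nat × Nat} :
    pvFlatA (pvEntN sa sb c) < pvFlatA (pvEntN sa sb c') ↔ pvKeyN sa sb c < pvKeyN sa sb c' := by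
  simp only [pvFlatA, pvEntN, pvEntA, pvKeyN, Int.toNat_natCast, List.cons_lt_cons_iff,
    List.not_lt_nil]
  simp only [true_and, and_true, lt_self_iff_false, false_or, or_false, false_and, and_false]
  omega

lemma pv_getD_mono {xs : List Int} (hs : xs.Pairwise (· ≤ ·)) {i j : Nat}
    (hij : i ≤ j) (hj : j < xs.length) : xs.getD i 0 ≤ xs.getD j 0 := by
  rcases lt_or_eq_of_le hij with h | rfl
  · have hi : i < xs.length := lt_trans h hj
    rw [List.getD_eq_getElem _ _ hi, List.getD_eq_getElem _ _ hj]
    exact List.pairwise_iff_getElem.mp hs i j hi hj h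
  · exact le_refl _

lemma pv_key_lt_right {sa sb : List Int} {n : Nat} (Hsb : sb.Pairwise (· ≤ ·))
    (Hb : n ≤ sb.length) {c : Nat × Nat} (h2 : c.2 + 1 < n) :
    pvKeyN sa sb c < pvKeyN sa sb (c.1, c.2 + 1) := by
  have hy : sb.getD c.2 0 ≤ sb.getD (c.2 + 1) 0 :=
    pv_getD_mono Hsb (Nat.le_succ _) (lt_of_lt_of_le h2 Hb)
  simp only [pvKeyN, List.cons_lt_cons_iff, List.not_lt_nil]
  simp only [true_and, and_true, lt_self_iff_false, false_or, or_false, false_and, and_false]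
  omega

lemma pv_key_lt_down {sa sb : List Int} {n : Nat} (Hsa : sa.Pairwise (· ≤ ·))
    (Hlen : sa.length = n) {c : Nat × Nat} (h1 : c.1 + 1 < n) :
    pvKeyN sa sb c < pvKeyN sa sb (c.1 + 1, c.2) := by
  have hx : sa.getD c.1 0 ≤ sa.getD (c.1 + 1) 0 :=
    pv_getD_mono Hsa (Nat.le_succ _) (by omega)
  simp only [pvKeyN, List.cons_lt_cons_iff, List.not_lt_nil]
  simp only [true_and, and_true, lt_self_iff_false, false_or, or_false, false_and, and_false]
  omega

-- the ports elaborate `sorted` with core's `List.instLT`; the PySem order lemmas state it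
-- with the LinearOrder-derived instances — same order, so the terms are equal
lemma pv_sorted_inst {α : Type} (g : List α) (k : α → List Int) :
    @PySem.List.sorted _ _ List.instLT (fun a b => a.decidableLT b) g k false =
      @PySem.List.sorted _ _ List.instLinearOrder.toLT LinearOrder.toDecidableLT g k false := by
  show @PySem.List.sorted _ _ List.instLinearOrder.toLT (fun a b => a.decidableLT b) g k false = _
  exact congrArg
    (fun d : DecidableLT (List Int) => @PySem.List.sorted _ _ List.instLinearOrder.toLT d g k false)
    (funext fun a => funext fun b => Subsingleton.elim _ _)

lemma pvSortL_eq (sa sb : List Int) (n : Nat) :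
    pvSortL sa sb n =
      @PySem.List.sorted _ _ List.instLinearOrder.toLT LinearOrder.toDecidableLT
        (pvGrid n) (pvKeyN sa sb) false :=
  pv_sorted_inst _ _

lemma pv_key_mono_getD (sa sb : List Int) (n : Nat) {p q : Nat} (hpq : p ≤ q)
    (hq : q < (pvSortL sa sb n).length) :
    pvKeyN sa sb ((pvSortL sa sb n).getD p (0, 0)) ≤
      pvKeyN sa sb ((pvSortL sa sb n).getD q (0, 0)) := by
  have hq2 := hq
  rw [pvSortL_eq] at hq2
  rw [pvSortL_eq]
  rw [List.getD_eq_getElem _ _ hq2, List.getD_eq_getElem _ _ (lt_of_le_of_lt hpq hq2)]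
  exact PySem.List.key_sorted_getElem_mono (pvGrid n) (pvKeyN sa sb) hpq hq2

lemma pv_sortL_perm (sa sb : List Int) (n : Nat) : (pvSortL sa sb n).Perm (pvGrid n) :=
  PySem.List.sorted_perm _ _ _

lemma pv_sortL_nodup (sa sb : List Int) (n : Nat) : (pvSortL sa sb n).Nodup :=
  ((pv_sortL_perm sa sb n).nodup_iff).mpr (pv_nodup_grid n)

lemma pv_sortL_length (sa sb : List Int) (n : Nat) : (pvSortL sa sb n).length = n * n := by
  rw [pvSortL, PySem.List.length_sorted]
  show ((List.range n) ×ˢ (List.range n)).length = n * n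
  simp [List.length_product]

lemma pv_sortL_pairwise (sa sb : List Int) (n : Nat) :
    (pvSortL sa sb n).Pairwise (fun c c' => pvKeyN sa sb c < pvKeyN sa sb c') := by
  have hle : (pvSortL sa sb n).Pairwise (fun a b => pvKeyN sa sb a ≤ pvKeyN sa sb b) := by
    rw [pvSortL_eq]; exact PySem.List.sorted_pairwise (pvGrid n) (pvKeyN sa sb)
  have hne : (pvSortL sa sb n).Pairwise (· ≠ ·) := pv_sortL_nodup sa sb n
  refine (hle.and hne).imp ?_
  rintro a b ⟨h1, h2⟩
  exact lt_of_le_of_ne h1 fun hk => h2 (pv_keyN_inj hk)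

-- a grid cell with key below the t-th sorted cell lies among the first t sorted cells
lemma pv_mem_take_of_lt {sa sb : List Int} {n t : Nat} (ht : t < (pvSortL sa sb n).length)
    {c : Nat × Nat} (hc : c ∈ pvGrid n)
    (hlt : pvKeyN sa sb c < pvKeyN sa sb ((pvSortL sa sb n).getD t (0, 0))) :
    c ∈ (pvSortL sa sb n).take t := by
  have hmem : c ∈ pvSortL sa sb n := ((pv_sortL_perm sa sb n).mem_iff).mpr ((pv_sortL_perm sa sb n).mem_iff.mp (by
    exact ((pv_sortL_perm sa sb n).mem_iff).mpr hc) )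
  have hmem : c ∈ pvSortL sa sb n := ((pv_sortL_perm sa sb n).mem_iff).mpr hc
  obtain ⟨s, hs, rfl⟩ := List.getElem_of_mem hmem
  by_cases hst : s < t
  · have hlen : s < ((pvSortL sa sb n).take t).length := by
      simp only [List.length_take]; omega
    have heq : ((pvSortL sa sb n).take t)[s]'hlen = (pvSortL sa sb n)[s]'hs :=
      List.getElem_take
    exact heq ▸ List.getElem_mem hlen
  · exfalso
    have hgd : (pvSortL sa sb n).getD s (0, 0) = (pvSortL sa sb n)[s]'hs :=
      List.getD_eq_getElem _ _ hs
    rw [← hgd] at hlt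
    exact absurd (pv_key_mono_getD sa sb n (by omega : t ≤ s) hs) (not_le.mpr hlt)

lemma pv_take_key_lt {sa sb : List Int} {n t : Nat} (ht : t < (pvSortL sa sb n).length)
    {c : Nat × Nat} (hc : c ∈ (pvSortL sa sb n).take t) :
    pvKeyN sa sb c < pvKeyN sa sb ((pvSortL sa sb n).getD t (0, 0)) := by
  obtain ⟨s, hs, heq⟩ := List.getElem_of_mem hc
  have hs' : s < t := by have := hs; simp only [List.length_take] at this; omega
  have hss : s < (pvSortL sa sb n).length := by simp only [List.length_take] at hs; omega
  have heq2 : (pvSortL sa sb n)[s]'hss = c := by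
    rw [← heq]; exact (List.getElem_take).symm
  rw [List.getD_eq_getElem _ _ ht, ← heq2]
  exact List.pairwise_iff_getElem.mp (pv_sortL_pairwise sa sb n) s t hss ht hs'

lemma pv_self_not_mem_take {sa sb : List Int} {n t : Nat} (ht : t < (pvSortL sa sb n).length) :
    (pvSortL sa sb n).getD t (0, 0) ∉ (pvSortL sa sb n).take t := by
  intro hmem
  obtain ⟨s, hs, heq⟩ := List.getElem_of_mem hmem
  have hs' : s < t := by have := hs; simp only [List.length_take] at this; omega
  have hss : s < (pvSortL sa sb n).length := by simp only [List.length_take] at hs; omega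
  have heq2 : (pvSortL sa sb n)[s]'hss = (pvSortL sa sb n)[t]'ht := by
    rw [List.getD_eq_getElem _ _ ht] at heq
    rw [← heq]; exact (List.getElem_take).symm
  have := ((pv_sortL_nodup sa sb n).getElem_inj_iff).mp heq2
  omega
lemma pv_key_le_of_not_take {sa sb : List Int} {n t : Nat} (ht : t < (pvSortL sa sb n).length)
    {c : Nat × Nat} (hc : c ∈ pvGrid n) (hnt : c ∉ (pvSortL sa sb n).take t) :
    pvKeyN sa sb ((pvSortL sa sb n).getD t (0, 0)) ≤ pvKeyN sa sb c := by
  have hmem : c ∈ pvSortL sa sb n := ((pv_sortL_perm sa sb n).mem_iff).mpr hc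
  obtain ⟨s, hs, rfl⟩ := List.getElem_of_mem hmem
  have hts : t ≤ s := by
    by_contra hlt2
    push_neg at hlt2
    refine hnt ?_
    have hlen : s < ((pvSortL sa sb n).take t).length := by
      simp only [List.length_take]; omega
    have heq : ((pvSortL sa sb n).take t)[s]'hlen = (pvSortL sa sb n)[s]'hs :=
      List.getElem_take
    exact heq ▸ List.getElem_mem hlen
  have hgd : (pvSortL sa sb n).getD s (0, 0) = (pvSortL sa sb n)[s]'hs :=
    List.getD_eq_getElem _ _ hs
  rw [← hgd]
  exact pv_key_mono_getD sa sb n hts hs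

-- pvHeapPopA returns a minimal element and a permutation of the rest
lemma pv_pop_spec (h : List ((Int × Int) × (Int × Int) × (Int × Int))) (hne : h ≠ []) :
    ∃ m r, pvHeapPopA h = some (m, r) ∧ (m :: r).Perm h ∧ ∀ x ∈ h, pvFlatA m ≤ pvFlatA x := by
  induction h with
  | nil => exact absurd rfl hne
  | cons e h ih =>
    cases h with
    | nil =>
      refine ⟨e, [], by simp [pvHeapPopA], List.Perm.refl _, ?_⟩
      intro x hx
      simp only [List.mem_singleton] at hx
      subst hx; exact le_refl _
    | cons f h2 =>
      obtain ⟨m, r, heq, hperm, hmin⟩ := ih (by simp)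
      by_cases hlt : pvFlatA e < pvFlatA m
      · refine ⟨e, f :: h2, ?_, List.Perm.refl _, ?_⟩
        · rw [pvHeapPopA, heq]; simp [hlt]
        · intro x hx
          rcases List.mem_cons.mp hx with rfl | hx
          · exact le_refl _
          · exact le_trans (le_of_lt hlt) (hmin x hx)
      · refine ⟨m, e :: r, ?_, ?_, ?_⟩
        · rw [pvHeapPopA, heq]; simp [hlt]
        · exact (List.Perm.swap e m r).trans (hperm.cons e)
        · intro x hx
          rcases List.mem_cons.mp hx with rfl | hx
          · exact le_of_not_gt hlt
          · exact hmin x hx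

-- characterisation of B's output
lemma pv_B_core (sa sb : List Int) (n : Nat) :
    ((PySem.List.sorted ((List.range n).flatMap (fun i => (List.range n).map (fun j =>
        (sa.getD i 0 + sb.getD j 0, sb.getD j 0, sa.getD i 0, (i : Int), (j : Int)))))
      pvKeyB false).take n).map (fun e => (e.2.2.1, e.2.1)) =
    ((pvSortL sa sb n).take n).map (pvPair sa sb) := by
  have hcells : (List.range n).flatMap (fun i => (List.range n).map (fun j =>
      (sa.getD i 0 + sb.getD j 0, sb.getD j 0, sa.getD i 0, (i : Int), (j : Int)))) =
      (pvGrid n).map (fun c : Nat × Nat =>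
        (sa.getD c.1 0 + sb.getD c.2 0, sb.getD c.2 0, sa.getD c.1 0, (c.1 : Int), (c.2 : Int))) := by
    simp only [pvGrid, List.map_flatMap, List.map_map]
    rfl
  have hpw : ((pvSortL sa sb n).map (fun c : Nat × Nat =>
      (sa.getD c.1 0 + sb.getD c.2 0, sb.getD c.2 0, sa.getD c.1 0, (c.1 : Int), (c.2 : Int)))).Pairwise
      (fun x y => pvKeyB x < pvKeyB y) := by
    refine List.Pairwise.map _ ?_ (pv_sortL_pairwise sa sb n)
    intro x y hxy
    exact hxy
  have hsorted := PySem.List.sorted_eq_of_perm_of_pairwise_lt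
    ((pvGrid n).map (fun c : Nat × Nat =>
      (sa.getD c.1 0 + sb.getD c.2 0, sb.getD c.2 0, sa.getD c.1 0, (c.1 : Int), (c.2 : Int))))
    ((pvSortL sa sb n).map (fun c : Nat × Nat =>
      (sa.getD c.1 0 + sb.getD c.2 0, sb.getD c.2 0, sa.getD c.1 0, (c.1 : Int), (c.2 : Int))))
    pvKeyB ((pv_sortL_perm sa sb n).map _) hpw
  rw [hcells, pv_sorted_inst, hsorted, ← List.map_take, List.map_map]
  rfl

lemma pv_B_char (a b : List Int) :
    nbestc_py_alt a b =
      ((pvSortL (PySem.List.sorted a (fun x => x) false) (PySem.List.sorted b (fun x => x) false)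
        a.length).take a.length).map
        (pvPair (PySem.List.sorted a (fun x => x) false) (PySem.List.sorted b (fun x => x) false)) := by
  exact pv_B_core (PySem.List.sorted a (fun x => x) false) (PySem.List.sorted b (fun x => x) false) a.length

-- state between the pop at step t and the two `put` expansions; T lists the successors
-- already offered to `put`
def PvMidInv (sa sb : List Int) (n t : Nat)
    (h : List ((Int × Int) × (Int × Int) × (Int × Int))) (used : PySem.Set (Int × Int))
    (T : List (Nat × Nat)) : Prop :=
  ∃ H : List (Nat × Nat),
    h = H.map (pvEntN sa sb) ∧ H.Nodup ∧
    (∀ c ∈ H, c ∈ pvGrid n) ∧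
    (∀ c ∈ H, c ∉ (pvSortL sa sb n).take (t + 1)) ∧
    (∀ c : Nat × Nat, c ∈ pvGrid n →
      (((c.1 : Int), (c.2 : Int)) ∈ used ↔ c ∈ (pvSortL sa sb n).take (t + 1) ∨ c ∈ H)) ∧
    (∀ c ∈ pvGrid n, (pvTrig ((pvSortL sa sb n).take t) c ∨ c ∈ T) →
      ((c.1 : Int), (c.2 : Int)) ∈ used)

lemma pv_mem_take_succ {sa sb : List Int} {n t : Nat} (ht : t < (pvSortL sa sb n).length)
    {c : Nat × Nat} :
    c ∈ (pvSortL sa sb n).take (t + 1) ↔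
      c ∈ (pvSortL sa sb n).take t ∨ c = (pvSortL sa sb n).getD t (0, 0) := by
  rw [List.getD_eq_getElem _ _ ht, List.take_succ, List.getElem?_eq_getElem ht]
  simp only [Option.toList_some, List.mem_append, List.mem_singleton]

lemma pv_put_cast (sa sb : List Int) (n : Nat)
    (st : List ((Int × Int) × (Int × Int) × (Int × Int)) × PySem.Set (Int × Int)) (d : Nat × Nat) :
    pvPutA sa sb (n : Int) st (d.1 : Int) (d.2 : Int) =
      if d.1 < n ∧ d.2 < n ∧ ((d.1 : Int), (d.2 : Int)) ∉ st.2 then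
        (pvEntN sa sb d :: st.1, PySem.Set.add st.2 ((d.1 : Int), (d.2 : Int)))
      else st := by
  have hiff : (0 ≤ (d.1 : Int) ∧ (d.1 : Int) < (n : Int) ∧ 0 ≤ (d.2 : Int) ∧
      (d.2 : Int) < (n : Int) ∧ ((d.1 : Int), (d.2 : Int)) ∉ st.2)
      ↔ (d.1 < n ∧ d.2 < n ∧ ((d.1 : Int), (d.2 : Int)) ∉ st.2) := by
    constructor
    · rintro ⟨-, h2, -, h4, h5⟩
      exact ⟨by exact_mod_cast h2, by exact_mod_cast h4, h5⟩
    · rintro ⟨h1, h2, h3⟩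
      exact ⟨Int.natCast_nonneg _, by exact_mod_cast h1, Int.natCast_nonneg _,
        by exact_mod_cast h2, h3⟩
  simp only [pvPutA, hiff]
  rfl

lemma pv_cast_pair_inj {c d : Nat × Nat}
    (h : ((c.1 : Int), (c.2 : Int)) = ((d.1 : Int), (d.2 : Int))) : c = d := by
  obtain ⟨h1, h2⟩ := Prod.ext_iff.mp h
  dsimp only at h1 h2
  exact Prod.ext (by exact_mod_cast h1) (by exact_mod_cast h2)

lemma pv_put_succ {sa sb : List Int} {n t : Nat} (ht : t < (pvSortL sa sb n).length)
    {h : List ((Int × Int) × (Int × Int) × (Int × Int))} {used : PySem.Set (Int × Int)}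
    {T : List (Nat × Nat)} {d : Nat × Nat}
    (hd : d ∈ pvGrid n → pvKeyN sa sb ((pvSortL sa sb n).getD t (0, 0)) < pvKeyN sa sb d)
    (hmid : PvMidInv sa sb n t h used T) :
    PvMidInv sa sb n t (pvPutA sa sb (n : Int) (h, used) (d.1 : Int) (d.2 : Int)).1
      (pvPutA sa sb (n : Int) (h, used) (d.1 : Int) (d.2 : Int)).2 (d :: T) := by
  obtain ⟨H, hh, hnd, hgrid, hdisj, hiff, htrig⟩ := hmid
  rw [pv_put_cast]
  by_cases g : d.1 < n ∧ d.2 < n ∧ ((d.1 : Int), (d.2 : Int)) ∉ ((h, used) :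
      List ((Int × Int) × (Int × Int) × (Int × Int)) × PySem.Set (Int × Int)).2
  · rw [if_pos g]
    have hdgrid : d ∈ pvGrid n := pv_mem_grid.mpr ⟨g.1, g.2.1⟩
    have hdH : d ∉ H := fun hmem => g.2.2 ((hiff d hdgrid).mpr (Or.inr hmem))
    refine ⟨d :: H, by simp [hh], List.nodup_cons.mpr ⟨hdH, hnd⟩, ?_, ?_, ?_, ?_⟩
    · intro e he
      rcases List.mem_cons.mp he with rfl | he
      · exact hdgrid
      · exact hgrid e he
    · intro e he
      rcases List.mem_cons.mp he with rfl | he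
      · intro hmem
        rcases (pv_mem_take_succ ht).mp hmem with hmem | heq
        · exact absurd (pv_take_key_lt ht hmem) (not_lt.mpr (le_of_lt (hd hdgrid)))
        · rw [heq] at hd
          exact absurd (hd (heq ▸ hdgrid)) (lt_irrefl _)
      · exact hdisj e he
    · intro e heg
      rw [PySem.Set.mem_add, hiff e heg]
      constructor
      · rintro ((h1 | h1) | h1)
        · exact Or.inl h1
        · exact Or.inr (List.mem_cons_of_mem _ h1)
        · exact Or.inr ((pv_cast_pair_inj h1) ▸ List.mem_cons_self)
      · rintro (h1 | h1)
        · exact Or.inl (Or.inl h1)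
        · rcases List.mem_cons.mp h1 with rfl | h1
          · exact Or.inr rfl
          · exact Or.inl (Or.inr h1)
    · intro e heg htr
      rw [PySem.Set.mem_add]
      rcases htr with htr | heT
      · exact Or.inl (htrig e heg (Or.inl htr))
      · rcases List.mem_cons.mp heT with rfl | heT
        · exact Or.inr rfl
        · exact Or.inl (htrig e heg (Or.inr heT))
  · rw [if_neg g]
    refine ⟨H, hh, hnd, hgrid, hdisj, hiff, ?_⟩
    intro e heg htr
    rcases htr with htr | heT
    · exact htrig e heg (Or.inl htr)
    · rcases List.mem_cons.mp heT with rfl | heT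
      · have hb := pv_mem_grid.mp heg
        by_contra hnot
        exact g ⟨hb.1, hb.2, hnot⟩
      · exact htrig e heg (Or.inr heT)

lemma pv_mid_to_inv {sa sb : List Int} {n t : Nat} (ht : t < (pvSortL sa sb n).length)
    {h : List ((Int × Int) × (Int × Int) × (Int × Int))} {used : PySem.Set (Int × Int)}
    {T : List (Nat × Nat)}
    (h1 : ((((pvSortL sa sb n).getD t (0, 0)).1 + 1, ((pvSortL sa sb n).getD t (0, 0)).2) :
      Nat × Nat) ∈ T)
    (h2 : ((((pvSortL sa sb n).getD t (0, 0)).1, ((pvSortL sa sb n).getD t (0, 0)).2 + 1) :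
      Nat × Nat) ∈ T)
    (hmid : PvMidInv sa sb n t h used T) :
    PvInv sa sb n (t + 1) h used := by
  obtain ⟨H, hh, hnd, hgrid, hdisj, hiff, htrig⟩ := hmid
  refine ⟨H, hh, hnd, hgrid, hdisj, hiff, ?_⟩
  intro e heg htr
  apply htrig e heg
  rcases htr with heq | ⟨hp, hpos⟩ | ⟨hp, hpos⟩
  · exact Or.inl (Or.inl heq)
  · rcases (pv_mem_take_succ ht).mp hp with hp | hp
    · exact Or.inl (Or.inr (Or.inl ⟨hp, hpos⟩))
    · refine Or.inr ?_
      have : e = ((((pvSortL sa sb n).getD t (0, 0)).1 + 1,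
          ((pvSortL sa sb n).getD t (0, 0)).2) : Nat × Nat) := by
        rw [Prod.ext_iff]
        obtain ⟨e1, e2⟩ := Prod.ext_iff.mp hp
        dsimp only at e1 e2 ⊢
        exact ⟨by omega, by omega⟩
      exact this ▸ h1
  · rcases (pv_mem_take_succ ht).mp hp with hp | hp
    · exact Or.inl (Or.inr (Or.inr ⟨hp, hpos⟩))
    · refine Or.inr ?_
      have : e = ((((pvSortL sa sb n).getD t (0, 0)).1,
          ((pvSortL sa sb n).getD t (0, 0)).2 + 1) : Nat × Nat) := by
        rw [Prod.ext_iff]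
        obtain ⟨e1, e2⟩ := Prod.ext_iff.mp hp
        dsimp only at e1 e2 ⊢
        exact ⟨by omega, by omega⟩
      exact this ▸ h2

-- one pop-and-expand step preserves the invariant and emits the t-th sorted cell
lemma pv_step {sa sb : List Int} {n : Nat} (Hsa : sa.Pairwise (· ≤ ·))
    (Hsb : sb.Pairwise (· ≤ ·)) (Hlen : sa.length = n) (Hb : n ≤ sb.length)
    {t : Nat} (ht : t < n) {h : List ((Int × Int) × (Int × Int) × (Int × Int))}
    {used : PySem.Set (Int × Int)} (inv : PvInv sa sb n t h used) :
    ∃ h',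
      pvHeapPopA h = some (pvEntN sa sb ((pvSortL sa sb n).getD t (0, 0)), h') ∧
      PvInv sa sb n (t + 1)
        (pvPutA sa sb n
          (pvPutA sa sb n (h', used)
            (((pvSortL sa sb n).getD t (0, 0)).1 + 1) (((pvSortL sa sb n).getD t (0, 0)).2))
          (((pvSortL sa sb n).getD t (0, 0)).1) ((((pvSortL sa sb n).getD t (0, 0)).2) + 1)).1
        (pvPutA sa sb n
          (pvPutA sa sb n (h', used)
            (((pvSortL sa sb n).getD t (0, 0)).1 + 1) (((pvSortL sa sb n).getD t (0, 0)).2))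
          (((pvSortL sa sb n).getD t (0, 0)).1) ((((pvSortL sa sb n).getD t (0, 0)).2) + 1)).2 := by
  have hLt : t < (pvSortL sa sb n).length := by
    rw [pv_sortL_length]
    have : n ≤ n * n := Nat.le_mul_of_pos_left n (by omega)
    omega
  obtain ⟨H, hh, hnd, hgrid, hdisj, hiff, htrig⟩ := inv
  have hcL : (pvSortL sa sb n).getD t (0, 0) ∈ pvSortL sa sb n := by
    rw [List.getD_eq_getElem _ _ hLt]
    exact List.getElem_mem hLt
  have hcgrid : (pvSortL sa sb n).getD t (0, 0) ∈ pvGrid n :=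
    ((pv_sortL_perm sa sb n).mem_iff).mp hcL
  have hcnt : (pvSortL sa sb n).getD t (0, 0) ∉ (pvSortL sa sb n).take t :=
    pv_self_not_mem_take hLt
  -- the t-th sorted cell was already offered to `put`, hence sits in the heap
  have hctrig : pvTrig ((pvSortL sa sb n).take t) ((pvSortL sa sb n).getD t (0, 0)) := by
    rcases hx : (pvSortL sa sb n).getD t (0, 0) with ⟨ci, cj⟩
    rw [hx] at hcgrid
    have hcb := pv_mem_grid.mp hcgrid
    dsimp only at hcb
    unfold pvTrig
    dsimp only
    rcases Nat.eq_zero_or_pos ci with h1 | h1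
    · rcases Nat.eq_zero_or_pos cj with h2 | h2
      · subst h1; subst h2; exact Or.inl rfl
      · refine Or.inr (Or.inr ⟨?_, h2⟩)
        have hpg : ((ci, cj - 1) : Nat × Nat) ∈ pvGrid n := pv_mem_grid.mpr ⟨hcb.1, by omega⟩
        have hklt := pv_key_lt_right (sa := sa) (sb := sb) (n := n) Hsb Hb (c := (ci, cj - 1))
          (by dsimp only; omega)
        have heqc : ((((ci, cj - 1) : Nat × Nat).1, ((ci, cj - 1) : Nat × Nat).2 + 1) : Nat × Nat)
            = ((ci, cj) : Nat × Nat) := by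
          rw [Prod.ext_iff]; dsimp only; exact ⟨rfl, by omega⟩
        rw [heqc, ← hx] at hklt
        exact pv_mem_take_of_lt hLt hpg hklt
    · refine Or.inr (Or.inl ⟨?_, h1⟩)
      have hpg : ((ci - 1, cj) : Nat × Nat) ∈ pvGrid n := pv_mem_grid.mpr ⟨by omega, hcb.2⟩
      have hklt := pv_key_lt_down (sa := sa) (sb := sb) (n := n) Hsa Hlen (c := (ci - 1, cj))
        (by dsimp only; omega)
      have heqc : ((((ci - 1, cj) : Nat × Nat).1 + 1, ((ci - 1, cj) : Nat × Nat).2) : Nat × Nat)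
          = ((ci, cj) : Nat × Nat) := by
        rw [Prod.ext_iff]; dsimp only; exact ⟨by omega, rfl⟩
      rw [heqc, ← hx] at hklt
      exact pv_mem_take_of_lt hLt hpg hklt
  have hcH : (pvSortL sa sb n).getD t (0, 0) ∈ H := by
    rcases (hiff _ hcgrid).mp (htrig _ hcgrid hctrig) with h1 | h1
    · exact absurd h1 hcnt
    · exact h1
  have hmemh : pvEntN sa sb ((pvSortL sa sb n).getD t (0, 0)) ∈ h := by
    rw [hh]
    exact List.mem_map_of_mem hcH
  obtain ⟨m, r, heq, hperm, hmin⟩ := pv_pop_spec h (List.ne_nil_of_mem hmemh)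
  have hmH : m ∈ h := hperm.subset List.mem_cons_self
  obtain ⟨cm, hcmH, hcmEq⟩ := List.mem_map.mp (by rw [hh] at hmH; exact hmH)
  have h1 : pvFlatA (pvEntN sa sb cm) ≤ pvFlatA (pvEntN sa sb ((pvSortL sa sb n).getD t (0, 0))) := by
    rw [hcmEq]
    exact hmin _ hmemh
  have h2 : pvKeyN sa sb cm ≤ pvKeyN sa sb ((pvSortL sa sb n).getD t (0, 0)) := by
    by_contra hgt
    push_neg at hgt
    exact absurd (pv_flat_lt_iff.mpr hgt) (not_lt.mpr h1)
  have h3 : pvKeyN sa sb ((pvSortL sa sb n).getD t (0, 0)) ≤ pvKeyN sa sb cm :=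
    pv_key_le_of_not_take hLt (hgrid cm hcmH) (hdisj cm hcmH)
  have hcm : cm = (pvSortL sa sb n).getD t (0, 0) := pv_keyN_inj (le_antisymm h2 h3)
  rw [hcm] at hcmEq
  rw [← hcmEq] at heq
  refine ⟨r, heq, ?_⟩
  -- recover the cell list behind the remaining heap
  have hrmap : ∀ x ∈ r, ∃ d ∈ H, pvEntN sa sb d = x := by
    intro x hx
    have hxh : x ∈ h := hperm.subset (List.mem_cons_of_mem _ hx)
    rw [hh] at hxh
    exact List.mem_map.mp hxh
  have hr : r = (r.map (fun e => (e.2.2.1.toNat, e.2.2.2.toNat))).map (pvEntN sa sb) := by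
    rw [List.map_map]
    have : r.map ((pvEntN sa sb) ∘ (fun e => (e.2.2.1.toNat, e.2.2.2.toNat))) = r.map id := by
      apply List.map_congr_left
      intro x hx
      obtain ⟨d, hdH, rfl⟩ := hrmap x hx
      show pvEntN sa sb (((pvEntN sa sb d).2.2.1.toNat, (pvEntN sa sb d).2.2.2.toNat)) = _
      simp [pvEntN, pvEntA]
    rw [this, List.map_id]
  have hHperm : H.Perm ((pvSortL sa sb n).getD t (0, 0) :: r.map (fun e => (e.2.2.1.toNat, e.2.2.2.toNat))) := by
    refine ((List.map_perm_map_iff (pv_entN_inj (sa := sa) (sb := sb))).mp ?_)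
    rw [← hh, List.map_cons, ← hr, hcmEq]
    exact hperm.symm
  have hndcons := (hHperm.nodup_iff).mp hnd
  obtain ⟨hgdH', hndH'⟩ := List.nodup_cons.mp hndcons
  have hmemH : ∀ d, d ∈ H ↔ d = (pvSortL sa sb n).getD t (0, 0) ∨
      d ∈ r.map (fun e => (e.2.2.1.toNat, e.2.2.2.toNat)) := by
    intro d
    rw [hHperm.mem_iff, List.mem_cons]
  have hmid : PvMidInv sa sb n t r used [] := by
    refine ⟨r.map (fun e => (e.2.2.1.toNat, e.2.2.2.toNat)), hr, hndH', ?_, ?_, ?_, ?_⟩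
    · intro d hd
      exact hgrid d ((hmemH d).mpr (Or.inr hd))
    · intro d hd hdt
      rcases (pv_mem_take_succ hLt).mp hdt with hdt | rfl
      · exact hdisj d ((hmemH d).mpr (Or.inr hd)) hdt
      · exact hgdH' hd
    · intro e heg
      rw [hiff e heg]
      constructor
      · rintro (h1 | h1)
        · exact Or.inl ((pv_mem_take_succ hLt).mpr (Or.inl h1))
        · rcases (hmemH e).mp h1 with rfl | h1
          · exact Or.inl ((pv_mem_take_succ hLt).mpr (Or.inr rfl))
          · exact Or.inr h1
      · rintro (h1 | h1)
        · rcases (pv_mem_take_succ hLt).mp h1 with h1 | rfl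
          · exact Or.inl h1
          · exact Or.inr hcH
        · exact Or.inr ((hmemH e).mpr (Or.inr h1))
    · intro e heg htr
      rcases htr with htr | htr
      · exact htrig e heg htr
      · exact absurd htr (List.not_mem_nil)
  have harg1 : ((((pvSortL sa sb n).getD t (0, 0)).1 : Int) + 1) =
      (((((pvSortL sa sb n).getD t (0, 0)).1 + 1 : Nat)) : Int) := by push_cast; ring
  have harg2 : ((((pvSortL sa sb n).getD t (0, 0)).2 : Int) + 1) =
      (((((pvSortL sa sb n).getD t (0, 0)).2 + 1 : Nat)) : Int) := by push_cast; ring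
  rw [harg1, harg2]
  have hd1 : ((((pvSortL sa sb n).getD t (0, 0)).1 + 1, ((pvSortL sa sb n).getD t (0, 0)).2) :
      Nat × Nat) ∈ pvGrid n →
      pvKeyN sa sb ((pvSortL sa sb n).getD t (0, 0)) <
        pvKeyN sa sb ((((pvSortL sa sb n).getD t (0, 0)).1 + 1,
          ((pvSortL sa sb n).getD t (0, 0)).2) : Nat × Nat) := by
    intro hg
    have hb := pv_mem_grid.mp hg
    dsimp only at hb
    have := pv_key_lt_down (sa := sa) (sb := sb) (n := n) Hsa Hlen
      (c := (pvSortL sa sb n).getD t (0, 0)) (by omega)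
    exact this
  have hd2 : ((((pvSortL sa sb n).getD t (0, 0)).1, ((pvSortL sa sb n).getD t (0, 0)).2 + 1) :
      Nat × Nat) ∈ pvGrid n →
      pvKeyN sa sb ((pvSortL sa sb n).getD t (0, 0)) <
        pvKeyN sa sb ((((pvSortL sa sb n).getD t (0, 0)).1,
          ((pvSortL sa sb n).getD t (0, 0)).2 + 1) : Nat × Nat) := by
    intro hg
    have hb := pv_mem_grid.mp hg
    dsimp only at hb
    have := pv_key_lt_right (sa := sa) (sb := sb) (n := n) Hsb Hb
      (c := (pvSortL sa sb n).getD t (0, 0)) (by omega)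
    exact this
  have hput1 := pv_put_succ hLt hd1 hmid
  have hput2 := pv_put_succ hLt hd2 hput1
  exact pv_mid_to_inv hLt (by simp) (by simp) hput2

lemma pv_loop {sa sb : List Int} {n : Nat} (Hsa : sa.Pairwise (· ≤ ·))
    (Hsb : sb.Pairwise (· ≤ ·)) (Hlen : sa.length = n) (Hb : n ≤ sb.length) :
    ∀ (k t : Nat), t + k = n → ∀ h used, PvInv sa sb n t h used →
      pvLoopA sa sb n k h used (((pvSortL sa sb n).take t).map (pvPair sa sb)) =
        ((pvSortL sa sb n).take n).map (pvPair sa sb) := by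
  intro k
  induction k with
  | zero =>
    intro t hteq h used _
    have : t = n := by omega
    subst this
    rfl
  | succ k ih =>
    intro t hteq h used inv
    have ht : t < n := by omega
    have hLt : t < (pvSortL sa sb n).length := by
      rw [pv_sortL_length]
      have : n ≤ n * n := Nat.le_mul_of_pos_left n (by omega)
      omega
    obtain ⟨h', heq, inv'⟩ := pv_step Hsa Hsb Hlen Hb ht inv
    have he1 : (pvEntN sa sb ((pvSortL sa sb n).getD t (0, 0))).2.2.1 =
        (((pvSortL sa sb n).getD t (0, 0)).1 : Int) := rfl
    have he2 : (pvEntN sa sb ((pvSortL sa sb n).getD t (0, 0))).2.2.2 =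
        (((pvSortL sa sb n).getD t (0, 0)).2 : Int) := rfl
    have he3 : (pvEntN sa sb ((pvSortL sa sb n).getD t (0, 0))).2.1 =
        pvPair sa sb ((pvSortL sa sb n).getD t (0, 0)) := rfl
    have htake : (pvSortL sa sb n).take (t + 1) =
        (pvSortL sa sb n).take t ++ [(pvSortL sa sb n).getD t (0, 0)] := by
      rw [List.getD_eq_getElem _ _ hLt, List.take_succ, List.getElem?_eq_getElem hLt]
      rfl
    rw [pvLoopA, heq]
    dsimp only
    rw [he1, he2, he3]
    have hout : ((pvSortL sa sb n).take t).map (pvPair sa sb) ++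
        [pvPair sa sb ((pvSortL sa sb n).getD t (0, 0))] =
        ((pvSortL sa sb n).take (t + 1)).map (pvPair sa sb) := by
      rw [htake, List.map_append]
      rfl
    rw [hout]
    exact ih (t + 1) (by omega) _ _ inv'

lemma pv_A_core (sa sb : List Int) (n : Nat) (Hsa : sa.Pairwise (· ≤ ·))
    (Hsb : sb.Pairwise (· ≤ ·)) (Hlen : sa.length = n) (Hb : n ≤ sb.length) :
    pvLoopA sa sb (n : Int) n
      (pvPutA sa sb (n : Int) ([], PySem.Set.empty) 0 0).1
      (pvPutA sa sb (n : Int) ([], PySem.Set.empty) 0 0).2 [] =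
    ((pvSortL sa sb n).take n).map (pvPair sa sb) := by
  rcases Nat.eq_zero_or_pos n with hn | hn
  · subst hn
    simp [pvPutA, pvLoopA]
  · have hst0 : pvPutA sa sb (n : Int) ([], PySem.Set.empty) 0 0 =
        ([pvEntN sa sb ((0, 0) : Nat × Nat)],
          PySem.Set.add PySem.Set.empty ((0 : Int), (0 : Int))) := by
      rw [pvPutA]
      rw [if_pos ⟨le_refl 0, by exact_mod_cast hn, le_refl 0, by exact_mod_cast hn,
        List.not_mem_nil⟩]
      rfl
    have h00grid : ((0, 0) : Nat × Nat) ∈ pvGrid n := pv_mem_grid.mpr ⟨hn, hn⟩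
    have inv0 : PvInv sa sb n 0
        (pvPutA sa sb (n : Int) ([], PySem.Set.empty) 0 0).1
        (pvPutA sa sb (n : Int) ([], PySem.Set.empty) 0 0).2 := by
      rw [hst0]
      refine ⟨[((0, 0) : Nat × Nat)], rfl, List.nodup_singleton _, ?_, ?_, ?_, ?_⟩
      · intro c hc
        rcases List.mem_singleton.mp hc with rfl
        exact h00grid
      · intro c _
        simp
      · intro e _
        rw [PySem.Set.mem_add]
        simp only [List.take_zero, List.not_mem_nil, false_or, List.mem_singleton]
        constructor
        · rintro (h1 | h1)
          · exact absurd h1 (List.not_mem_nil)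
          · have : e = ((0, 0) : Nat × Nat) := by
              refine pv_cast_pair_inj (c := e) (d := ((0, 0) : Nat × Nat)) ?_
              rw [h1]
              norm_num
            exact this
        · rintro rfl
          exact Or.inr (by norm_num)
      · intro e _ htr
        rw [PySem.Set.mem_add]
        rcases htr with heq | ⟨hp, _⟩ | ⟨hp, _⟩
        · subst heq
          exact Or.inr (by norm_num)
        · exact absurd hp (by simp)
        · exact absurd hp (by simp)
    have hloop := pv_loop Hsa Hsb Hlen Hb n 0 (by omega)
      (pvPutA sa sb (n : Int) ([], PySem.Set.empty) 0 0).1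
      (pvPutA sa sb (n : Int) ([], PySem.Set.empty) 0 0).2 inv0
    rw [List.take_zero, List.map_nil] at hloop
    exact hloop

-- ===== VERDICT (by name: the statement is the Claim_ definition above) =====
theorem nbestc_py_spec : Claim_equal_nbestc_py := by
  unfold Claim_equal_nbestc_py
  intro a b _ hpre
  unfold Pre_nbestc_py at hpre
  unfold Spec_nbestc_py
  rw [pv_B_char]
  show pvLoopA _ _ _ _ _ _ _ = _
  exact pv_A_core (PySem.List.sorted a (fun x => x) false)
    (PySem.List.sorted b (fun x => x) false) a.length
    (PySem.List.sorted_pairwise a _)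
    (PySem.List.sorted_pairwise b _)
    (PySem.List.length_sorted a _ _)
    (by rw [PySem.List.length_sorted]; exact hpre)
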